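-- pv_equiv track=rewrite | github.com/RegCookies/Offer-Sward | List/abs_min.py | absMin
-- ===== SOURCE A (Python) =====
-- def absMin(arr):
--     if arr[0] >0:
--         return arr[0]
--     if arr[-1] <0:
--         return arr[-1]
--
--     low = 0
--     high = len(arr)
--
--     while low < high:
--         mid = (low + high)//2
--         if arr[mid] == 0:
--             return 0
--         elif arr[mid] >0:
--             if arr[mid-1] <= 0:
--                 return min(abs(arr[mid]),abs(arr[mid-1]))
--
--             else:
--                 high = mid
--         elif arr[mid] < 0:
--             if arr[mid+1] >= 0:
--                 return min(abs(arr[mid]),abs(arr[mid+1]))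
--             else:
--                 low = mid
-- ===== SOURCE B (Python) =====
-- def absMin(arr):
--     if arr[0] > 0:
--         return arr[0]
--     if arr[-1] < 0:
--         return arr[-1]
--     return min(abs(x) for x in arr)
-- ===== Notes on version B (the rewrite author's own statement) =====
-- stated objective: simpler
-- what changed: Keeps the two signed guards but replaces the whole binary-search while-loop with a single min(abs(x) for x in arr) linear scan for the sign-crossing case.
-- outside the precondition, e.g. on absMin([0, -5, 2]): A returns 2, B returns 0; on absMin([-1, 5, -6, 2]): A returns 2, B returns 1
import Mathlib
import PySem

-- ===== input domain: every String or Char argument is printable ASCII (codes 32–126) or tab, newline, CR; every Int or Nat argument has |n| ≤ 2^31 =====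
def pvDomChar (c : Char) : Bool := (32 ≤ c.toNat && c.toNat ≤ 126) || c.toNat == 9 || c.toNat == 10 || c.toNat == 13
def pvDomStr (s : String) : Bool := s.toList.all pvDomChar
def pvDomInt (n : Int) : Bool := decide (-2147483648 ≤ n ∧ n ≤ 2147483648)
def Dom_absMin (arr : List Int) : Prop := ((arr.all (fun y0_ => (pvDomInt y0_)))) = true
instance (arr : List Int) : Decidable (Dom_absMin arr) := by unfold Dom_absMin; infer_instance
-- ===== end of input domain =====

-- B keeps A's two signed guards but replaces the binary-search loop by a linear min-of-abs scan (objective: simpler).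

-- ===== PORT A =====
-- the while-loop; fuel bounds the iterations (Python can loop forever only on unsorted input, outside Pre_);
-- low/high are nonnegative Python ints, so Nat with Nat-division matches (low+high)//2 exactly
def absMinLoop (arr : List Int) : Nat → Nat → Nat → Int
  | 0, _, _ => 0
  | fuel+1, low, high =>
    if low < high then
      let mid := (low + high) / 2
      let am := PySem.List.pyGetD arr (mid : Int) 0
      if am = 0 then 0
      else if 0 < am then
        let prev := PySem.List.pyGetD arr ((mid : Int) - 1) 0
        if prev ≤ 0 then min |am| |prev| else absMinLoop arr fuel low mid
      else
        let nxt := PySem.List.pyGetD arr ((mid : Int) + 1) 0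
        if 0 ≤ nxt then min |am| |nxt| else absMinLoop arr fuel mid high
    else 0  -- Python falls off the loop returning None; unreachable under Pre_

def absMin (arr : List Int) : Int :=
  let a0 := PySem.List.pyGetD arr 0 0      -- arr[0]; IndexError on [] is excluded by Pre_
  if 0 < a0 then a0
  else
    let an := PySem.List.pyGetD arr (-1) 0
    if an < 0 then an
    else absMinLoop arr (arr.length + 1) 0 arr.length

-- ===== PORT B =====
def absMin_alt (arr : List Int) : Int :=
  let a0 := PySem.List.pyGetD arr 0 0      -- arr[0]; IndexError on [] is excluded by Pre_
  if 0 < a0 then a0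
  else
    let an := PySem.List.pyGetD arr (-1) 0
    if an < 0 then an
    else (PySem.List.min? (arr.map (fun x => |x|)) (fun y => y)).getD 0  -- min(abs(x) for x in arr)

-- ===== PRECONDITION & SPEC =====
-- Pre_ excludes the empty list (A raises IndexError) and unsorted sign-crossing lists (first element
-- ≤ 0 and last element ≥ 0 but not sorted), on which A's binary search returns accidental values
-- (or raises IndexError / loops forever); the function is specified on sorted input, and on any list
-- caught by one of the two guards both programs trivially return that same element.
def Pre_absMin (arr : List Int) : Prop :=
  arr ≠ [] ∧ (0 < arr.getD 0 0 ∨ arr.getD (arr.length - 1) 0 < 0 ∨ arr.Pairwise (· ≤ ·))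
instance (arr : List Int) : Decidable (Pre_absMin arr) := by unfold Pre_absMin; infer_instance
def pvWitness_absMin : List Int := [-2, 0, 3]

def Spec_absMin (arr : List Int) (out : Int) : Prop := out = absMin_alt arr
instance (arr : List Int) (out : Int) : Decidable (Spec_absMin arr out) := by unfold Spec_absMin; infer_instance

-- ===== CLAIM (what is proved, stated in full; the proofs are below) =====
def Claim_equal_absMin : Prop := ∀ (arr : List Int), Dom_absMin arr → Pre_absMin arr → Spec_absMin arr (absMin arr)

-- ===== LEMMAS AND PROOFS =====

-- loop invariant: on a sorted sign-crossing array the binary search returns the global minimum of |·|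
theorem absMinLoop_eq (arr : List Int) (hs : arr.Pairwise (· ≤ ·)) (m : Int)
    (hm : PySem.List.min? (arr.map (fun x => |x|)) (fun y => y) = some m)
    (h0 : ∀ (h : 0 < arr.length), arr[0] ≤ 0)
    (hL : ∀ (h : 0 < arr.length), 0 ≤ arr[arr.length - 1]) :
    ∀ (fuel low high : Nat), low < high → high ≤ arr.length →
      (low = 0 ∨ ∀ (h : low < arr.length), arr[low] < 0) →
      (high = arr.length ∨ ∀ (h : high < arr.length), 0 < arr[high]) →
      high - low < fuel →
      absMinLoop arr fuel low high = m := by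
  have hcongr : ∀ (i j : Nat) (hi : i < arr.length) (hj : j < arr.length), i = j →
      arr[i] = arr[j] := by
    intro i j hi hj h; subst h; rfl
  have hmono : ∀ (i j : Nat) (hi : i < arr.length) (hj : j < arr.length), i ≤ j → arr[i] ≤ arr[j] := by
    intro i j hi hj hij
    rcases Nat.eq_or_lt_of_le hij with h | h
    · subst h; exact le_refl _
    · exact List.pairwise_iff_getElem.1 hs i j hi hj h
  have hub : ∀ (i : Nat) (hi : i < arr.length), m ≤ |arr[i]| := by
    intro i hi
    exact PySem.List.min?_isMin hm _ (List.mem_map.2 ⟨arr[i], List.getElem_mem hi, rfl⟩)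
  have hwit : ∃ (i : Nat) (hi : i < arr.length), m = |arr[i]| := by
    have := PySem.List.min?_mem hm
    rcases List.mem_map.1 this with ⟨x, hx, hxm⟩
    rcases List.mem_iff_getElem.1 hx with ⟨i, hi, rfl⟩
    exact ⟨i, hi, hxm.symm⟩
  intro fuel
  induction fuel with
  | zero => intro low high _ _ _ _ hf; omega
  | succ fuel ih =>
    intro low high hlh hhl hlow hhigh hf
    have hlen : low < arr.length := lt_of_lt_of_le hlh hhl
    simp only [absMinLoop, if_pos hlh]
    have hmlow : low ≤ (low + high) / 2 := by omega
    have hmhigh : (low + high) / 2 < high := by omega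
    have hmlen : (low + high) / 2 < arr.length := by omega
    set mid := (low + high) / 2 with hmiddef
    have hgm : PySem.List.pyGetD arr (mid : Int) 0 = arr[mid] := by
      have h := PySem.List.pyGetD_eq_getElem arr (i := (mid : Int)) 0 (by omega) (by exact_mod_cast hmlen)
      simpa using h
    rw [hgm]
    by_cases hz : arr[mid] = 0
    · rw [if_pos hz]
      have h1 := hub mid hmlen
      have h1' : |arr[mid]| = 0 := abs_eq_zero.2 hz
      rcases hwit with ⟨i, hi, hmi⟩
      have h2 : (0:Int) ≤ |arr[i]| := abs_nonneg _
      omega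
    · rw [if_neg hz]
      by_cases hp : 0 < arr[mid]
      · rw [if_pos hp]
        have hmid1 : 1 ≤ mid := by
          by_contra h
          have hm0 : mid = 0 := by omega
          have ha := h0 (by omega)
          have heq : arr[mid] = arr[0]'(by omega) := hcongr _ _ hmlen (by omega) hm0
          omega
        have hgp : PySem.List.pyGetD arr ((mid : Int) - 1) 0 = arr[mid - 1]'(by omega) := by
          have hidx : ((mid : Int) - 1) = ((mid - 1 : Nat) : Int) := by omega
          rw [hidx]
          have h := PySem.List.pyGetD_eq_getElem arr (i := ((mid - 1 : Nat) : Int)) 0 (by omega)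
            (by exact_mod_cast (by omega : mid - 1 < arr.length))
          simpa using h
        rw [hgp]
        by_cases hprev : arr[mid - 1]'(by omega) ≤ 0
        · rw [if_pos hprev]
          have h1 := hub mid hmlen
          have h2 := hub (mid - 1) (by omega)
          rcases hwit with ⟨i, hi, hmi⟩
          rcases Nat.lt_or_ge i mid with hcase | hcase
          · have hmo := hmono i (mid - 1) hi (by omega) (by omega)
            have habs : |arr[mid - 1]'(by omega)| ≤ |arr[i]| := by
              rw [abs_of_nonpos hprev, abs_of_nonpos (by omega)]; omega
            have h3 : min |arr[mid]| |arr[mid - 1]'(by omega)| ≤ |arr[i]| :=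
              le_trans (min_le_right _ _) habs
            omega
          · have hmo := hmono mid i hmlen hi hcase
            have habs : |arr[mid]| ≤ |arr[i]| := by
              rw [abs_of_pos hp, abs_of_pos (by omega)]; omega
            have h3 : min |arr[mid]| |arr[mid - 1]'(by omega)| ≤ |arr[i]| :=
              le_trans (min_le_left _ _) habs
            omega
        · rw [if_neg hprev]
          have hlm : low < mid := by
            rcases Nat.lt_or_ge low mid with h | h
            · exact h
            · exfalso
              have hle : mid = low := by omega
              rcases hlow with h0' | hneg
              · omega
              · have hv := hneg hlen
                have heq : arr[mid] = arr[low] := hcongr _ _ hmlen hlen hle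
                omega
          exact ih low mid hlm (by omega) hlow (Or.inr (fun h => hp)) (by omega)
      · rw [if_neg hp]
        have hneg : arr[mid] < 0 := by omega
        have hmid2 : mid + 1 < arr.length := by
          by_contra h
          have hm0 : mid = arr.length - 1 := by omega
          have ha := hL (by omega)
          have heq : arr[mid] = arr[arr.length - 1]'(by omega) := hcongr _ _ hmlen (by omega) hm0
          omega
        have hgn : PySem.List.pyGetD arr ((mid : Int) + 1) 0 = arr[mid + 1] := by
          have hidx : ((mid : Int) + 1) = ((mid + 1 : Nat) : Int) := by omega
          rw [hidx]
          have h := PySem.List.pyGetD_eq_getElem arr (i := ((mid + 1 : Nat) : Int)) 0 (by omega)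
            (by exact_mod_cast hmid2)
          simpa using h
        rw [hgn]
        by_cases hnxt : 0 ≤ arr[mid + 1]
        · rw [if_pos hnxt]
          have h1 := hub mid hmlen
          have h2 := hub (mid + 1) hmid2
          rcases hwit with ⟨i, hi, hmi⟩
          rcases Nat.lt_or_ge i (mid + 1) with hcase | hcase
          · have hmo := hmono i mid hi hmlen (by omega)
            have habs : |arr[mid]| ≤ |arr[i]| := by
              rw [abs_of_neg hneg, abs_of_nonpos (by omega)]; omega
            have h3 : min |arr[mid]| |arr[mid + 1]| ≤ |arr[i]| :=
              le_trans (min_le_left _ _) habs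
            omega
          · have hmo := hmono (mid + 1) i hmid2 hi hcase
            have habs : |arr[mid + 1]| ≤ |arr[i]| := by
              rw [abs_of_nonneg hnxt, abs_of_nonneg (by omega)]; omega
            have h3 : min |arr[mid]| |arr[mid + 1]| ≤ |arr[i]| :=
              le_trans (min_le_right _ _) habs
            omega
        · rw [if_neg hnxt]
          have hlm : low < mid := by
            rcases Nat.lt_or_ge low mid with h | h
            · exact h
            · exfalso
              have hle : mid = low := by omega
              rcases hhigh with hEq | hpos
              · omega
              · have hv := hpos (by omega)
                have heq : arr[high]'(by omega) = arr[mid + 1] := hcongr _ _ (by omega) hmid2 (by omega)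
                omega
          exact ih mid high hmhigh hhl (Or.inr (fun h => hneg)) hhigh (by omega)

-- ===== VERDICT (by name: the statement is the Claim_ definition above) =====
theorem absMin_spec : Claim_equal_absMin := by
  intro arr _ hpre
  obtain ⟨hne, hdisj⟩ := hpre
  have hlen : 0 < arr.length := List.length_pos_of_ne_nil hne
  unfold Spec_absMin absMin absMin_alt
  have hg0 : PySem.List.pyGetD arr 0 0 = arr[0] := by
    have h := PySem.List.pyGetD_eq_getElem arr (i := 0) 0 le_rfl (by exact_mod_cast hlen)
    simpa using h
  have hgl : PySem.List.pyGetD arr (-1) 0 = arr[arr.length - 1] := by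
    rw [PySem.List.pyGetD_neg_one arr 0 hne, List.getLast_eq_getElem]
  rw [hg0, hgl]
  by_cases h1 : (0:Int) < arr[0]
  · rw [if_pos h1, if_pos h1]
  · rw [if_neg h1, if_neg h1]
    by_cases h2 : arr[arr.length - 1] < 0
    · rw [if_pos h2, if_pos h2]
    · rw [if_neg h2, if_neg h2]
      have hd0 : arr.getD 0 0 = arr[0] := by
        rw [List.getD_eq_getElem?_getD, List.getElem?_eq_getElem hlen]; rfl
      have hdl : arr.getD (arr.length - 1) 0 = arr[arr.length - 1] := by
        rw [List.getD_eq_getElem?_getD, List.getElem?_eq_getElem (by omega)]; rfl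
      have hs : arr.Pairwise (· ≤ ·) := by
        rcases hdisj with h | h | h
        · rw [hd0] at h; exact absurd h h1
        · rw [hdl] at h; exact absurd h h2
        · exact h
      have hmapne : arr.map (fun x => |x|) ≠ [] := by
        simp only [ne_eq, List.map_eq_nil_iff]; exact hne
      obtain ⟨m, hm⟩ : ∃ m, PySem.List.min? (arr.map (fun x => |x|)) (fun y => y) = some m := by
        rcases hopt : PySem.List.min? (arr.map (fun x => |x|)) (fun y => y) with _ | m
        · exact absurd ((PySem.List.min?_eq_none_iff _ _).1 hopt) hmapne
        · exact ⟨m, rfl⟩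
      rw [hm, Option.getD_some]
      exact absMinLoop_eq arr hs m hm (fun _ => by omega) (fun _ => by omega)
        (arr.length + 1) 0 arr.length hlen le_rfl (Or.inl rfl) (Or.inl rfl) (by omega)
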